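-- pv_equiv track=rewrite | github.com/BrenoGustavo/AdventoOfCode | 2024/solutions/day_25.py | count_height_lock
-- ===== SOURCE A (Python) =====
-- def count_height_lock(eschematic):
--
--     lenght = len(eschematic[0])
--     heights = []
--     for i in range(lenght):
--         cur = []
--         for j in eschematic:
--             cur.append(j[i])
--
--         counts_dot = cur.count(".")
--
--         heights.append(counts_dot)
--     return heights
-- ===== SOURCE B (Python) =====
-- def count_height_lock(eschematic):
--     length = len(eschematic[0])
--     heights = [0] * length
--     for j in eschematic:
--         heights = [h + (1 if j[i] == "." else 0) for i, h in enumerate(heights)]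
--     return heights
-- ===== Notes on version B (the rewrite author's own statement) =====
-- stated objective: simpler
-- what changed: Row-major single pass updating per-column counters via enumerate, instead of A's column-major pass that materializes each column list and calls .count on it.
import Mathlib
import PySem

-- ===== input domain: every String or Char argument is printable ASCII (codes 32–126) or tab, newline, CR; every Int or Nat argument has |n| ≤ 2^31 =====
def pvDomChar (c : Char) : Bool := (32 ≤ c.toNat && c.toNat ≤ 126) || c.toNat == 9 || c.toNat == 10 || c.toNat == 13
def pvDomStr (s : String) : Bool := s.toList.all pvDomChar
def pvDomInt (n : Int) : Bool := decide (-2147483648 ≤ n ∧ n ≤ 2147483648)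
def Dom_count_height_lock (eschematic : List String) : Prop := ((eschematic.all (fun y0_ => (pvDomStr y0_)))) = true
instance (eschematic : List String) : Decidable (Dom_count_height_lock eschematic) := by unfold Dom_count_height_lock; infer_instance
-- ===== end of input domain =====

-- B replaces A's column-major pass (materialize each column, then .count('.')) by a row-major
-- single pass maintaining per-column counters; simpler, same cost.


-- ===== PORT A =====
def count_height_lock (eschematic : List String) : List Int :=
  let lenght : Int := PySem.Str.len ((PySem.List.pyGet? eschematic 0).getD "")
  (PySem.List.pyRange 0 lenght 1).foldl (fun heights i =>
    let cur : List Char :=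
      eschematic.foldl (fun cur j => cur ++ [(PySem.Str.pyGet? j i).getD ' ']) []
    let counts_dot : Int := (cur.count '.' : Int)
    heights ++ [counts_dot]) []

-- ===== PORT B =====
def count_height_lock_alt (eschematic : List String) : List Int :=
  let length : Int := PySem.Str.len ((PySem.List.pyGet? eschematic 0).getD "")
  let heights0 : List Int := List.replicate length.toNat 0
  eschematic.foldl (fun heights j =>
    (PySem.List.enumerate heights).map (fun p =>
      p.2 + if (PySem.Str.pyGet? j p.1).getD ' ' == '.' then 1 else 0)) heights0

-- ===== PRECONDITION & SPEC =====
-- Pre_ excludes exactly the inputs where Python A raises IndexError: the empty list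
-- (eschematic[0]) and ragged grids where some row is shorter than the first row (j[i]).
def Pre_count_height_lock (eschematic : List String) : Prop :=
  eschematic ≠ [] ∧ ∀ s ∈ eschematic, ((eschematic.headD "").toList).length ≤ (s.toList).length
instance (eschematic : List String) : Decidable (Pre_count_height_lock eschematic) := by
  unfold Pre_count_height_lock; infer_instance
def pvWitness_count_height_lock : List String := ["..#", "#..", "..."]
def Spec_count_height_lock (eschematic : List String) (out : List Int) : Prop :=
  out = count_height_lock_alt eschematic
instance (eschematic : List String) (out : List Int) : Decidable (Spec_count_height_lock eschematic out) := by
  unfold Spec_count_height_lock; infer_instance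

-- ===== CLAIM (what is proved, stated in full; the proofs are below) =====
def Claim_equal_count_height_lock : Prop := ∀ (eschematic : List String), Dom_count_height_lock eschematic → Pre_count_height_lock eschematic → Spec_count_height_lock eschematic (count_height_lock eschematic)

-- ===== LEMMAS AND PROOFS =====

-- enumerate of a range-map is the range-map of pairs
theorem pv_enumerate_range_map (n : Nat) (f : Nat → Int) (s : Int) :
    PySem.List.enumerate ((List.range n).map f) s
      = (List.range n).map (fun k : Nat => ((s + (k : Int), f k) : Int × Int)) := by
  induction n generalizing s with
  | zero => simp
  | succ m ih =>
    rw [List.range_succ, List.map_append, List.map_append,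
      PySem.List.enumerate_append, ih]
    simp

-- one row step of B on a range-shaped state
theorem pv_step_range (n : Nat) (f : Nat → Int) (j : String) :
    (PySem.List.enumerate ((List.range n).map f)).map (fun p =>
        p.2 + if (PySem.Str.pyGet? j p.1).getD ' ' == '.' then 1 else 0)
      = (List.range n).map (fun k : Nat =>
          f k + if (PySem.Str.pyGet? j (k : Int)).getD ' ' == '.' then 1 else 0) := by
  rw [pv_enumerate_range_map n f 0, List.map_map]
  refine List.map_congr_left (fun k _ => ?_)
  simp

-- B's fold invariant: starting from a range-shaped state, the result is pointwise
-- the start plus the per-column '.' count of the processed rows.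
theorem pv_fold_invariant (rows : List String) (n : Nat) (f : Nat → Int) :
    rows.foldl (fun heights j =>
        (PySem.List.enumerate heights).map (fun p =>
          p.2 + if (PySem.Str.pyGet? j p.1).getD ' ' == '.' then 1 else 0))
      ((List.range n).map f)
    = (List.range n).map (fun k : Nat =>
        f k + ((rows.map (fun j => (PySem.Str.pyGet? j (k : Int)).getD ' ')).count '.' : Int)) := by
  induction rows generalizing f with
  | nil => simp
  | cons j rest ih =>
    rw [List.foldl_cons, pv_step_range, ih]
    refine List.map_congr_left (fun k _ => ?_)
    simp only [List.map_cons, List.count_cons, Nat.cast_add, Nat.cast_ite,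
      Nat.cast_one, Nat.cast_zero]
    ring

-- A's fold produces the same range-map of column counts
theorem pv_A_eq (es : List String) (n : Nat) :
    (PySem.List.pyRange 0 (n : Int) 1).foldl (fun heights i =>
        heights ++
          [((es.foldl (fun cur j => cur ++ [(PySem.Str.pyGet? j i).getD ' ']) []).count '.' : Int)]) []
    = (List.range n).map (fun k : Nat =>
        ((es.map (fun j => (PySem.Str.pyGet? j (k : Int)).getD ' ')).count '.' : Int)) := by
  rw [PySem.List.foldl_append_singleton_eq_map, PySem.List.pyRange_one]
  simp only [Int.sub_zero, Int.toNat_natCast, List.map_map, List.nil_append]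
  refine List.map_congr_left (fun k _ => ?_)
  simp only [Function.comp_apply, zero_add]
  rw [PySem.List.foldl_append_singleton_eq_map]
  simp

theorem pv_replicate_eq_range_map (n : Nat) :
    (List.replicate n (0 : Int)) = (List.range n).map (fun _ => 0) := by
  simp [List.map_const']

-- ===== VERDICT (by name: the statement is the Claim_ definition above) =====
theorem count_height_lock_spec : Claim_equal_count_height_lock := by
  intro es _hdom _hpre
  unfold Spec_count_height_lock
  dsimp only [count_height_lock, count_height_lock_alt]
  have hn : (PySem.Str.len ((PySem.List.pyGet? es 0).getD "")) =
      (((PySem.Str.len ((PySem.List.pyGet? es 0).getD "")).toNat : Nat) : Int) := by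
    have : 0 ≤ PySem.Str.len ((PySem.List.pyGet? es 0).getD "") := by
      simp [PySem.Str.len_eq]
    omega
  rw [pv_replicate_eq_range_map, pv_fold_invariant, hn, pv_A_eq]
  refine List.map_congr_left (fun k _ => ?_)
  ring
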